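-- pv_equiv track=rewrite | github.com/cherry01027/DPGASP | model.py | strucount_extraction
-- ===== SOURCE A (Python) =====
-- def strucount_extraction(string, structure_count):
--     structure_types = set()
--     for char in string:
--         # Determine the type of character and add it to the set
--         if char.islower():
--             structure_types.add('lowercase')
--         elif char.isupper():
--             structure_types.add('uppercase')
--         elif char.isdigit():
--             structure_types.add('digit')
--         else:
--             structure_types.add('special')
--     item_structure = len(structure_types)
--     if item_structure in structure_count:
--         structure_count[item_structure] += 1
--     # Otherwise, add the structure number to the dictionary and set the count to 1
--     else:
--         structure_count[item_structure] = 1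
--     return structure_count
-- ===== SOURCE B (Python) =====
-- def strucount_extraction(string, structure_count):
--     has_lower = any(c.islower() for c in string)
--     has_upper = any(c.isupper() for c in string)
--     has_digit = any(c.isdigit() for c in string)
--     has_special = any(not (c.islower() or c.isupper() or c.isdigit())
--                       for c in string)
--     n = has_lower + has_upper + has_digit + has_special
--     structure_count[n] = structure_count.get(n, 0) + 1
--     return structure_count
-- ===== Notes on version B (the rewrite author's own statement) =====
-- stated objective: alternative
-- what changed: Replaces A's single set-accumulating pass and two-way dict branch by four independent any-scans for category presence flags, summed to the count, followed by a single branch-free get-then-set dict update.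
import Mathlib
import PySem

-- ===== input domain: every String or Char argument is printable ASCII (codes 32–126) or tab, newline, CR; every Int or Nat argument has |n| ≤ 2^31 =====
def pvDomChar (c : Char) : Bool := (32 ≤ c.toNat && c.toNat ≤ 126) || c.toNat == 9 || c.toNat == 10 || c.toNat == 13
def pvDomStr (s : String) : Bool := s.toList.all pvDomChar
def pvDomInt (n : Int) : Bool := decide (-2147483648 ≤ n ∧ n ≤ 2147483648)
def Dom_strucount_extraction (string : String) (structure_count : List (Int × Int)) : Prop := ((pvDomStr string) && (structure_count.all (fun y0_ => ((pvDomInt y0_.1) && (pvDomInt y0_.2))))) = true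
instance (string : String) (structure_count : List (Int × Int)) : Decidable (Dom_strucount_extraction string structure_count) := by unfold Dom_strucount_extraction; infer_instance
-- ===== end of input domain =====

-- B replaces A's single set-accumulating pass and two-way dict branch by four
-- independent presence scans summed to the category count and one branch-free
-- dict get-then-set update (objective: alternative decomposition).
-- Both the Python A and Python B mutate structure_count in place and return it;
-- the equivalence proved here is about the returned association list.

-- ===== PORT A =====
def strucount_extraction (string : String) (structure_count : List (Int × Int)) : List (Int × Int) :=
  let structure_types : PySem.Set String :=
    string.toList.foldl (fun st c =>
      if PySem.Chars.islower c then PySem.Set.add st "lowercase"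
      else if PySem.Chars.isupper c then PySem.Set.add st "uppercase"
      else if PySem.Chars.isdigit c then PySem.Set.add st "digit"
      else PySem.Set.add st "special") PySem.Set.empty
  let item_structure : Int := PySem.Set.len structure_types
  let d : PySem.Dict Int Int := PySem.Dict.mk structure_count
  if d.contains item_structure then
    (d.insert item_structure (d.getD item_structure 0 + 1)).items
  else
    (d.insert item_structure 1).items

-- ===== PORT B =====
def strucount_extraction_alt (string : String) (structure_count : List (Int × Int)) : List (Int × Int) :=
  let cs := string.toList
  let has_lower := cs.any PySem.Chars.islower
  let has_upper := cs.any PySem.Chars.isupper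
  let has_digit := cs.any PySem.Chars.isdigit
  let has_special := cs.any (fun c =>
    !(PySem.Chars.islower c || PySem.Chars.isupper c || PySem.Chars.isdigit c))
  let n : Int := (if has_lower then 1 else 0) + (if has_upper then 1 else 0)
      + (if has_digit then 1 else 0) + (if has_special then 1 else 0)
  let d : PySem.Dict Int Int := PySem.Dict.mk structure_count
  (d.insert n (d.getD n 0 + 1)).items

-- ===== PRECONDITION & SPEC =====
def Spec_strucount_extraction (string : String) (structure_count : List (Int × Int)) (out : List (Int × Int)) : Prop := out = strucount_extraction_alt string structure_count
instance (string : String) (structure_count : List (Int × Int)) (out : List (Int × Int)) : Decidable (Spec_strucount_extraction string structure_count out) := by unfold Spec_strucount_extraction; infer_instance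

-- ===== CLAIM (what is proved, stated in full; the proofs are below) =====
def Claim_equal_strucount_extraction : Prop := ∀ (string : String) (structure_count : List (Int × Int)), Dom_strucount_extraction string structure_count → Spec_strucount_extraction string structure_count (strucount_extraction string structure_count)

-- ===== LEMMAS AND PROOFS =====

-- The category label A adds for a character.
def pvCat (c : Char) : String :=
  if PySem.Chars.islower c then "lowercase"
  else if PySem.Chars.isupper c then "uppercase"
  else if PySem.Chars.isdigit c then "digit"
  else "special"

theorem pvCat_mem (c : Char) :
    pvCat c ∈ ["lowercase", "uppercase", "digit", "special"] := by
  unfold pvCat; split_ifs <;> simp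

theorem pv_lower_not_upper {c : Char} (h : PySem.Chars.islower c = true) :
    PySem.Chars.isupper c = false := by
  simp [PySem.Chars.islower, PySem.Chars.isupper, Char.le_def, UInt32.le_iff_toNat_le] at *
  omega

theorem pv_lower_not_digit {c : Char} (h : PySem.Chars.islower c = true) :
    PySem.Chars.isdigit c = false := by
  simp [PySem.Chars.islower, PySem.Chars.isdigit, Char.le_def, UInt32.le_iff_toNat_le] at *
  omega

theorem pv_upper_not_digit {c : Char} (h : PySem.Chars.isupper c = true) :
    PySem.Chars.isdigit c = false := by
  simp [PySem.Chars.isupper, PySem.Chars.isdigit, Char.le_def, UInt32.le_iff_toNat_le] at *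
  omega

theorem pvCat_eq_lower (c : Char) :
    (pvCat c = "lowercase") ↔ PySem.Chars.islower c = true := by
  unfold pvCat; split_ifs <;> simp_all

theorem pvCat_eq_upper (c : Char) :
    (pvCat c = "uppercase") ↔ PySem.Chars.isupper c = true := by
  unfold pvCat
  split_ifs with h1 h2 h3 <;> simp_all [pv_lower_not_upper]

theorem pvCat_eq_digit (c : Char) :
    (pvCat c = "digit") ↔ PySem.Chars.isdigit c = true := by
  unfold pvCat
  split_ifs with h1 h2 h3 <;>
    simp_all [pv_lower_not_digit, pv_upper_not_digit]

theorem pvCat_eq_special (c : Char) :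
    (pvCat c = "special") ↔
      (!(PySem.Chars.islower c || PySem.Chars.isupper c || PySem.Chars.isdigit c)) = true := by
  unfold pvCat; split_ifs <;> simp_all

-- A's accumulation loop builds exactly set(map(pvCat, cs)).
theorem pv_fold_eq_ofList (cs : List Char) :
    cs.foldl (fun st c =>
      if PySem.Chars.islower c then PySem.Set.add st "lowercase"
      else if PySem.Chars.isupper c then PySem.Set.add st "uppercase"
      else if PySem.Chars.isdigit c then PySem.Set.add st "digit"
      else PySem.Set.add st "special") PySem.Set.empty
    = PySem.Set.ofList (cs.map pvCat) := by
  have hstep : ∀ (st : PySem.Set String) (c : Char),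
      (if PySem.Chars.islower c then PySem.Set.add st "lowercase"
       else if PySem.Chars.isupper c then PySem.Set.add st "uppercase"
       else if PySem.Chars.isdigit c then PySem.Set.add st "digit"
       else PySem.Set.add st "special") = PySem.Set.add st (pvCat c) := by
    intro st c; unfold pvCat; split_ifs <;> rfl
  rw [PySem.Set.ofList_eq_foldl, List.foldl_map]
  congr 1
  funext st c
  exact hstep st c

-- The set of categories is a permutation of the four-label list filtered by membership,
-- so its size is the sum of the four presence flags.
theorem pv_len_eq (cs : List Char) :
    ((PySem.Set.ofList (cs.map pvCat)).length : Int)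
    = (if cs.any PySem.Chars.islower then 1 else 0)
      + (if cs.any PySem.Chars.isupper then 1 else 0)
      + (if cs.any PySem.Chars.isdigit then 1 else 0)
      + (if cs.any (fun c =>
            !(PySem.Chars.islower c || PySem.Chars.isupper c || PySem.Chars.isdigit c))
         then 1 else 0) := by
  set s := PySem.Set.ofList (cs.map pvCat) with hs
  have hnodup : s.Nodup := PySem.Set.nodup_ofList _
  have hmem : ∀ x, x ∈ s ↔ x ∈ cs.map pvCat := by
    intro x; rw [hs]; exact PySem.Set.mem_ofList (α := String) (y := x) (xs := cs.map pvCat)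
  set L := (["lowercase", "uppercase", "digit", "special"]).filter (fun x => x ∈ cs.map pvCat)
    with hL
  have hfour : (["lowercase", "uppercase", "digit", "special"] : List String).Nodup := by decide
  have hLnodup : L.Nodup := hfour.filter (fun x => decide (x ∈ cs.map pvCat))
  have hperm : s.Perm L := by
    rw [List.perm_ext_iff_of_nodup hnodup hLnodup]
    intro a
    rw [hmem, hL, List.mem_filter]
    constructor
    · intro ha
      refine ⟨?_, by simpa using ha⟩
      rcases List.mem_map.mp ha with ⟨c, _, rfl⟩
      exact pvCat_mem c
    · intro ⟨_, ha⟩; simpa using ha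
  rw [hperm.length_eq, hL]
  have hml : ("lowercase" ∈ cs.map pvCat) ↔ cs.any PySem.Chars.islower = true := by
    simp [List.mem_map, List.any_eq_true, pvCat_eq_lower]
  have hmu : ("uppercase" ∈ cs.map pvCat) ↔ cs.any PySem.Chars.isupper = true := by
    simp [List.mem_map, List.any_eq_true, pvCat_eq_upper]
  have hmd : ("digit" ∈ cs.map pvCat) ↔ cs.any PySem.Chars.isdigit = true := by
    simp [List.mem_map, List.any_eq_true, pvCat_eq_digit]
  have hms : ("special" ∈ cs.map pvCat) ↔
      cs.any (fun c =>
        !(PySem.Chars.islower c || PySem.Chars.isupper c || PySem.Chars.isdigit c)) = true := by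
    simp [List.mem_map, List.any_eq_true, pvCat_eq_special]
  simp only [List.filter_cons, List.filter_nil, decide_eq_true_eq]
  simp only [hml, hmu, hmd, hms]
  split_ifs <;> simp

theorem pv_getD_zero_of_not_contains (d : PySem.Dict Int Int) (k : Int)
    (h : d.contains k = false) : d.getD k 0 = 0 := by
  unfold PySem.Dict.getD PySem.Dict.get?
  have : d.items.find? (fun p => p.1 == k) = none := by
    rw [List.find?_eq_none]
    intro p hp
    simp only [PySem.Dict.contains] at h
    exact (List.any_eq_false.mp h) p hp
  simp [this]

-- ===== VERDICT (by name: the statement is the Claim_ definition above) =====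
theorem strucount_extraction_spec : Claim_equal_strucount_extraction := by
  intro string structure_count _
  unfold Spec_strucount_extraction strucount_extraction strucount_extraction_alt
  simp only []
  rw [pv_fold_eq_ofList]
  have hlen := pv_len_eq string.toList
  set n : Int := ((PySem.Set.ofList (string.toList.map pvCat)).length : Int) with hn
  have hlen' : PySem.Set.len (PySem.Set.ofList (string.toList.map pvCat)) = n := by
    simp [PySem.Set.len, hn]
  rw [hlen', ← hlen]
  by_cases hc : (PySem.Dict.mk structure_count : PySem.Dict Int Int).contains n = true
  · simp [hc]
  · simp only [Bool.not_eq_true] at hc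
    rw [pv_getD_zero_of_not_contains _ _ hc]
    simp [hc]
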